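-- pv_equiv track=rewrite | github.com/sashakorets/labs | Laba5.py | RemoveLongerWords
-- ===== SOURCE A (Python) =====
-- def RemoveLongerWords(list1,list2):
--     '''
--         funk compares len(element[i]) of list1 and len(element[i]) of list2
--         if same element[i] of list1 bigger len(element[i]) of list2, funk remove him
--         if element[i] of list1==element[i] of list2 , funk remove two element
--     :param list1:(list)
--     :param list2:(list)
--         len(list1)==len(list1)
--     :return: mode list1,list2
--     '''
--     n1 = 0
--     n2 = 0
--     for i in range(len(list1)-n1) :
--         if len(list1[i-n1]) > len(list2[i-n2]) :
--             del list1[i-n1]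
--             n1 += 1
--         elif len(list1[i-n1]) < len(list2[i-n2]) :
--             del list2[i-n2]
--             n2 += 1
--         elif len(list1[i-n1]) == len(list2[i-n2]) :
--             del list1[i-n1]
--             del list2[i-n2]
--             n1 += 1
--             n2 += 1
--
--     if len(list1)==0 and len(list2)==0:
--         list2.append('is clean')
--         list1.append('is clean')
--     elif len(list1)==0:
--         list1.append('is clean')
--     elif len(list2)==0:
--         list2.append('is clean')
--     return list1,list2
-- ===== SOURCE B (Python) =====
-- def RemoveLongerWords(list1, list2):
--     # Single pass over the paired prefix: keep list1 words strictly shorter than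
--     # their partner, keep list2 words strictly shorter than their partner
--     # (plus list2's unpaired tail), then mark empty lists 'is clean'.
--     # Mutates list1/list2 in place via slice assignment, like A's in-place dels.
--     pairs = list(zip(list1, list2))
--     tail = list2[len(list1):]
--     list1[:] = [x for x, y in pairs if len(x) < len(y)]
--     list2[:] = [y for x, y in pairs if len(x) > len(y)] + tail
--     if not list1:
--         list1.append('is clean')
--     if not list2:
--         list2.append('is clean')
--     return list1, list2
-- ===== Notes on version B (the rewrite author's own statement) =====
-- stated objective: faster
-- what changed: Replaces A's index-juggling loop with in-place del (each del shifts the list tail) by a single pass over the zipped pairs building the two survivor lists with filters, plus list2's unpaired tail.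
import Mathlib
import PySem

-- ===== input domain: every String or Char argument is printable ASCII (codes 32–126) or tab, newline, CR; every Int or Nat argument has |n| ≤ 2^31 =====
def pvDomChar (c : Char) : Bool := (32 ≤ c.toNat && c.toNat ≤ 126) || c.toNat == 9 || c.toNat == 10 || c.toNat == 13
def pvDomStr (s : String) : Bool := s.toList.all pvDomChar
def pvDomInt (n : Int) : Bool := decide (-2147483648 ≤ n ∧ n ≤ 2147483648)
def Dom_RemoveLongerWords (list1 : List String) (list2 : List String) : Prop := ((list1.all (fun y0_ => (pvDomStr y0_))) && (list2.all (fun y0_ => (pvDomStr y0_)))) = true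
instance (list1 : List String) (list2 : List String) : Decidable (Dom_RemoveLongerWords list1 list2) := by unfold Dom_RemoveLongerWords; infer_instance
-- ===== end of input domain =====

-- B replaces A's quadratic in-place deletions with one linear pass over the zipped lists (alternative/faster);
-- A and B both mutate list1/list2 in place in Python — equivalence here is about the returned pair.


-- ===== PORT A =====
-- `del l[i]` (index known in range under Pre_): pop? and drop the popped element
def pvDelAt (l : List String) (i : Int) : List String :=
  ((PySem.List.pop? l i).map Prod.snd).getD l

-- one iteration of A's for-loop; state = (list1, list2, n1, n2)
def pvStepA (st : List String × List String × Int × Int) (i : Int) :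
    List String × List String × Int × Int :=
  let (l1, l2, n1, n2) := st
  if PySem.Str.len (PySem.List.pyGetD l1 (i - n1) "") > PySem.Str.len (PySem.List.pyGetD l2 (i - n2) "") then
    (pvDelAt l1 (i - n1), l2, n1 + 1, n2)
  else if PySem.Str.len (PySem.List.pyGetD l1 (i - n1) "") < PySem.Str.len (PySem.List.pyGetD l2 (i - n2) "") then
    (l1, pvDelAt l2 (i - n2), n1, n2 + 1)
  else if PySem.Str.len (PySem.List.pyGetD l1 (i - n1) "") = PySem.Str.len (PySem.List.pyGetD l2 (i - n2) "") then
    (pvDelAt l1 (i - n1), pvDelAt l2 (i - n2), n1 + 1, n2 + 1)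
  else st

def RemoveLongerWords (list1 : List String) (list2 : List String) : List String × List String :=
  let st := (PySem.List.pyRange 0 ((list1.length : Int) - 0) 1).foldl pvStepA (list1, list2, 0, 0)
  let l1 := st.1
  let l2 := st.2.1
  if l1.length = 0 && l2.length = 0 then (l1 ++ ["is clean"], l2 ++ ["is clean"])
  else if l1.length = 0 then (l1 ++ ["is clean"], l2)
  else if l2.length = 0 then (l1, l2 ++ ["is clean"])
  else (l1, l2)

-- ===== PORT B =====
def RemoveLongerWords_alt (list1 : List String) (list2 : List String) : List String × List String :=
  let pairs := list1.zip list2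
  let tail := PySem.List.slice list2 (some (list1.length : Int)) none
  let k1 := (pairs.filter (fun p => PySem.Str.len p.1 < PySem.Str.len p.2)).map Prod.fst
  let k2 := (pairs.filter (fun p => PySem.Str.len p.1 > PySem.Str.len p.2)).map Prod.snd ++ tail
  let r1 := if k1.isEmpty then k1 ++ ["is clean"] else k1
  let r2 := if k2.isEmpty then k2 ++ ["is clean"] else k2
  (r1, r2)

-- ===== PRECONDITION & SPEC =====
-- Pre_ excludes list1 longer than list2, where A always raises IndexError (list2[i-n2] out of range).
def Pre_RemoveLongerWords (list1 : List String) (list2 : List String) : Prop :=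
  list1.length ≤ list2.length
instance (list1 : List String) (list2 : List String) : Decidable (Pre_RemoveLongerWords list1 list2) := by unfold Pre_RemoveLongerWords; infer_instance

def pvWitness_RemoveLongerWords : List String × List String := (["a", "xyz"], ["bb", "q"])

def Spec_RemoveLongerWords (list1 : List String) (list2 : List String) (out : List String × List String) : Prop := out = RemoveLongerWords_alt list1 list2
instance (list1 : List String) (list2 : List String) (out : List String × List String) : Decidable (Spec_RemoveLongerWords list1 list2 out) := by unfold Spec_RemoveLongerWords; infer_instance

-- ===== CLAIM (what is proved, stated in full; the proofs are below) =====
def Claim_equal_RemoveLongerWords : Prop := ∀ (list1 : List String) (list2 : List String), Dom_RemoveLongerWords list1 list2 → Pre_RemoveLongerWords list1 list2 → Spec_RemoveLongerWords list1 list2 (RemoveLongerWords list1 list2)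

-- ===== LEMMAS AND PROOFS =====

-- the two survivor lists of the paired prefix
def pvF1 (xs ys : List String) : List String :=
  ((xs.zip ys).filter (fun p => PySem.Str.len p.1 < PySem.Str.len p.2)).map Prod.fst
def pvF2 (xs ys : List String) : List String :=
  ((xs.zip ys).filter (fun p => PySem.Str.len p.1 > PySem.Str.len p.2)).map Prod.snd

theorem pvGetD_append_length (as : List String) (b : String) (bs : List String) (d : String) :
    List.getD (as ++ b :: bs) as.length d = b := by
  induction as with
  | nil => rfl
  | cons a as ih => simpa [List.getD] using ih

theorem pvEraseIdx_append_length (as : List String) (b : String) (bs : List String) :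
    (as ++ b :: bs).eraseIdx as.length = as ++ bs := by
  induction as with
  | nil => rfl
  | cons a as ih => simpa [List.eraseIdx] using ih

theorem pvDelAt_append_length (as : List String) (b : String) (bs : List String) :
    pvDelAt (as ++ b :: bs) (as.length : Int) = as ++ bs := by
  have h : as.length < (as ++ b :: bs).length := by simp
  rw [pvDelAt, PySem.List.pop?_natCast (as ++ b :: bs) as.length h]
  simp [pvEraseIdx_append_length]

theorem pv_loop_inv (xs : List String) : ∀ (ys k1 k2 : List String) (i0 n1 n2 : Int),
    xs.length ≤ ys.length → i0 - n1 = (k1.length : Int) → i0 - n2 = (k2.length : Int) →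
    ((List.range xs.length).map (fun (k : Nat) => i0 + (k : Int))).foldl pvStepA (k1 ++ xs, k2 ++ ys, n1, n2)
      = (k1 ++ pvF1 xs ys, k2 ++ pvF2 xs ys ++ ys.drop xs.length,
         i0 + xs.length - k1.length - (pvF1 xs ys).length,
         i0 + xs.length - k2.length - (pvF2 xs ys).length) := by
  induction xs with
  | nil =>
    intro ys k1 k2 i0 n1 n2 _ h1 h2
    simp [pvF1, pvF2]
    omega
  | cons x xs ih =>
    intro ys k1 k2 i0 n1 n2 hlen h1 h2
    obtain ⟨y, ys', rfl⟩ : ∃ y ys', ys = y :: ys' := by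
      cases ys with
      | nil => simp at hlen
      | cons y ys' => exact ⟨y, ys', rfl⟩
    have hmap : (List.range (x :: xs).length).map (fun (k : Nat) => i0 + (k : Int))
        = i0 :: (List.range xs.length).map (fun (k : Nat) => (i0 + 1) + (k : Int)) := by
      rw [List.length_cons, List.range_succ_eq_map, List.map_cons, List.map_map]
      refine congrArg₂ _ (by simp) (List.map_congr_left fun k _ => ?_)
      simp [Function.comp]
      ring
    rw [hmap, List.foldl_cons]
    have hget1 : PySem.List.pyGetD (k1 ++ x :: xs) (i0 - n1) "" = x := by
      rw [h1, PySem.List.pyGetD_natCast, pvGetD_append_length]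
    have hget2 : PySem.List.pyGetD (k2 ++ y :: ys') (i0 - n2) "" = y := by
      rw [h2, PySem.List.pyGetD_natCast, pvGetD_append_length]
    have hdel1 : pvDelAt (k1 ++ x :: xs) (i0 - n1) = k1 ++ xs := by
      rw [h1, pvDelAt_append_length]
    have hdel2 : pvDelAt (k2 ++ y :: ys') (i0 - n2) = k2 ++ ys' := by
      rw [h2, pvDelAt_append_length]
    have hlen' : xs.length ≤ ys'.length := by simpa using hlen
    rcases lt_trichotomy (PySem.Str.len x) (PySem.Str.len y) with hc | hc | hc <;>
      [ (have hcn : x.length < y.length := by simp [PySem.Str.len_eq] at hc; exact_mod_cast hc);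
        (have hcn : x.length = y.length := by simp [PySem.Str.len_eq] at hc; exact_mod_cast hc);
        (have hcn : y.length < x.length := by simp [PySem.Str.len_eq] at hc; exact_mod_cast hc) ]
    · -- len x < len y : keep x in list1, delete y from list2
      have hstep : pvStepA (k1 ++ x :: xs, k2 ++ y :: ys', n1, n2) i0
          = (k1 ++ x :: xs, pvDelAt (k2 ++ y :: ys') (i0 - n2), n1, n2 + 1) := by
        simp only [pvStepA, hget1, hget2]
        rw [if_neg (by omega), if_pos hc]
      rw [hstep, hdel2]
      have := ih ys' (k1 ++ [x]) k2 (i0 + 1) n1 (n2 + 1)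
        hlen' (by simp; omega) (by omega)
      simp only [List.append_assoc, List.cons_append, List.nil_append] at this
      rw [this]
      have hf1 : pvF1 (x :: xs) (y :: ys') = x :: pvF1 xs ys' := by
        simp [pvF1, List.filter_cons, hcn]
      have hf2 : pvF2 (x :: xs) (y :: ys') = pvF2 xs ys' := by
        simp [pvF2, List.filter_cons, hcn, not_lt.mpr (le_of_lt hcn)]
      rw [hf1, hf2]
      simp only [Prod.mk.injEq, List.length_cons, List.append_assoc, List.cons_append,
        List.nil_append, List.drop_succ_cons]
      refine ⟨by first | rfl | simp, by first | rfl | simp, ?_, ?_⟩ <;>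
        (push_cast [List.length_append, List.length_cons, List.length_nil]; omega)
    · -- equal lengths : delete both
      have hstep : pvStepA (k1 ++ x :: xs, k2 ++ y :: ys', n1, n2) i0
          = (pvDelAt (k1 ++ x :: xs) (i0 - n1), pvDelAt (k2 ++ y :: ys') (i0 - n2), n1 + 1, n2 + 1) := by
        simp only [pvStepA, hget1, hget2]
        rw [if_neg (by omega), if_neg (by omega), if_pos hc]
      rw [hstep, hdel1, hdel2]
      have := ih ys' k1 k2 (i0 + 1) (n1 + 1) (n2 + 1) hlen' (by omega) (by omega)
      rw [this]
      have hf1 : pvF1 (x :: xs) (y :: ys') = pvF1 xs ys' := by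
        simp [pvF1, List.filter_cons, hcn]
      have hf2 : pvF2 (x :: xs) (y :: ys') = pvF2 xs ys' := by
        simp [pvF2, List.filter_cons, hcn]
      rw [hf1, hf2]
      simp only [Prod.mk.injEq, List.length_cons, List.append_assoc, List.cons_append,
        List.nil_append, List.drop_succ_cons]
      refine ⟨by first | rfl | simp, by first | rfl | simp, ?_, ?_⟩ <;>
        (push_cast [List.length_append, List.length_cons, List.length_nil]; omega)
    · -- len x > len y : delete x from list1, keep y in list2
      have hstep : pvStepA (k1 ++ x :: xs, k2 ++ y :: ys', n1, n2) i0
          = (pvDelAt (k1 ++ x :: xs) (i0 - n1), k2 ++ y :: ys', n1 + 1, n2) := by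
        simp only [pvStepA, hget1, hget2]
        rw [if_pos hc]
      rw [hstep, hdel1]
      have := ih ys' k1 (k2 ++ [y]) (i0 + 1) (n1 + 1) n2
        hlen' (by omega) (by simp; omega)
      simp only [List.append_assoc, List.cons_append, List.nil_append] at this
      rw [this]
      have hf1 : pvF1 (x :: xs) (y :: ys') = pvF1 xs ys' := by
        simp [pvF1, List.filter_cons, not_lt.mpr (le_of_lt hcn)]
      have hf2 : pvF2 (x :: xs) (y :: ys') = y :: pvF2 xs ys' := by
        simp [pvF2, List.filter_cons, hcn]
      rw [hf1, hf2]
      simp only [Prod.mk.injEq, List.length_cons, List.append_assoc, List.cons_append,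
        List.nil_append, List.drop_succ_cons]
      refine ⟨by first | rfl | simp, by first | rfl | simp, ?_, ?_⟩ <;>
        (push_cast [List.length_append, List.length_cons, List.length_nil]; omega)

-- ===== VERDICT (by name: the statement is the Claim_ definition above) =====
theorem pv_alt_eq (list1 list2 : List String) :
    RemoveLongerWords_alt list1 list2 =
      (let k1 := pvF1 list1 list2
       let k2 := pvF2 list1 list2 ++ PySem.List.slice list2 (some (list1.length : Int)) none
       (if k1.isEmpty then k1 ++ ["is clean"] else k1,
        if k2.isEmpty then k2 ++ ["is clean"] else k2)) := rfl

theorem RemoveLongerWords_spec : Claim_equal_RemoveLongerWords := by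
  intro list1 list2 _ hpre
  unfold Spec_RemoveLongerWords
  rw [pv_alt_eq]
  unfold RemoveLongerWords
  have hrange : PySem.List.pyRange 0 ((list1.length : Int) - 0) 1
      = (List.range list1.length).map (fun (k : Nat) => (0 : Int) + (k : Int)) := by
    rw [PySem.List.pyRange_one]
    simp
  rw [hrange]
  have hinv := pv_loop_inv list1 list2 [] [] 0 0 0 hpre (by simp) (by simp)
  simp only [List.nil_append] at hinv
  rw [hinv, PySem.List.slice_from_natCast]
  generalize pvF1 list1 list2 = K1
  generalize pvF2 list1 list2 ++ List.drop list1.length list2 = K2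
  cases K1 <;> cases K2 <;> simp
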